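-- pv_equiv track=rewrite | github.com/SamuelNw/Python_DSA_practice | Dynamic_Programming/all_construct.py | all_construct_tab
-- ===== SOURCE A (Python) =====
-- from typing import List
--
-- def all_construct_tab(target: str, wordBank: List[list]) -> List[list]:
--     table = [[] for _ in range(len(target) + 1)]
--     table[0] = [[]]
--
--     for i in range(len(table)):
--         for word in wordBank:
--             if target[i:i + len(word)] == word:
--                 for arr in table[i]:
--                     new_arr = arr + [word]
--                     table[i+len(word)].append(new_arr)
--
--     return table[-1]
-- ===== SOURCE B (Python) =====
-- def all_construct_tab(target, wordBank):
--     # Top-down memoized recursion: ways(i) = all constructions of target[:i],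
--     # collected by the start index of the last word, ascending.
--     memo = {0: [[]]}
--
--     def ways(i):
--         if i in memo:
--             return memo[i]
--         res = []
--         for start in range(i):
--             word_len = i - start
--             for word in wordBank:
--                 if len(word) == word_len and target[start:i] == word:
--                     for arr in ways(start):
--                         res.append(arr + [word])
--         memo[i] = res
--         return res
--
--     return ways(len(target))
-- ===== Notes on version B (the rewrite author's own statement) =====
-- stated objective: alternative
-- what changed: Replaced A's bottom-up tabulation that pushes each table[i] forward onto table[i+len(word)] by a top-down memoized recursion ways(i) that pulls the constructions of each shorter prefix from the memo, iterating start positions of the last word ascending.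
import Mathlib
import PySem

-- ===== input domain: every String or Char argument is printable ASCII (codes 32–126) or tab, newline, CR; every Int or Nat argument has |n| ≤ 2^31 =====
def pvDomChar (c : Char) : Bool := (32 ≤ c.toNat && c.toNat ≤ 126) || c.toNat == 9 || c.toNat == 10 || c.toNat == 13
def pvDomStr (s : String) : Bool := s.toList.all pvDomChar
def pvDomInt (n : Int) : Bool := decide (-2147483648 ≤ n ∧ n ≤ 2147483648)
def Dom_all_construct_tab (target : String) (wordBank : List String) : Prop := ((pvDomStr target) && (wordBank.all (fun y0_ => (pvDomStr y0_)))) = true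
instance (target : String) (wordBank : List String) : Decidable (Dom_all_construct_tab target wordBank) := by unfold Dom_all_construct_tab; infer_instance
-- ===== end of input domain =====

-- B replaces A's bottom-up push-forward tabulation by a top-down memoized recursion on
-- prefix length (objective: alternative decomposition, same asymptotic cost).

-- ===== PORT A =====
-- body of `if target[i:i+len(word)] == word:` — append arr + [word] for each arr of table[i] onto table[i+len(word)]
def acInner (tgt : List Char) (i : Nat) (table : List (List (List String))) (word : String) : List (List (List String)) :=
  if PySem.List.slice tgt (some (i : Int)) (some ((i : Int) + (word.toList.length : Int))) = word.toList then
    table.modify (i + word.toList.length)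
      (fun l => l ++ (table.getD i []).map (fun arr => arr ++ [word]))
  else table

def all_construct_tab (target : String) (wordBank : List String) : List (List String) :=
  let tgt := target.toList
  let table : List (List (List String)) := List.replicate (tgt.length + 1) []   -- [[] for _ in range(len(target)+1)]
  let table := table.set 0 [[]]                                                -- table[0] = [[]]
  let table := (List.range table.length).foldl                                 -- for i in range(len(table)):
    (fun tb i => wordBank.foldl (acInner tgt i) tb) table                      --   for word in wordBank: …
  table.getLastD []                                                            -- return table[-1]

-- ===== PORT B =====
-- body of ways(i) of Source B: all constructions of target[:i], built from the memoized earlier values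
def acStep (tgt : List Char) (wordBank : List String) (memo : List (List (List String))) (i : Nat) : List (List String) :=
  (List.range i).foldl (fun res start =>                                       -- for start in range(i):
    wordBank.foldl (fun res word =>                                            --   for word in wordBank:
      if word.toList.length = i - start ∧
         PySem.List.slice tgt (some (start : Int)) (some (i : Int)) = word.toList then
        res ++ (memo.getD start []).map (fun arr => arr ++ [word])             --     res.append(arr + [word])
      else res) res) []

-- the memo table {0: [[]], 1: ways(1), …}; entry i+1 is computed from the entries below it
def acMemo (tgt : List Char) (wordBank : List String) : Nat → List (List (List String))
  | 0 => [[[]]]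
  | i + 1 =>
      let m := acMemo tgt wordBank i
      m ++ [acStep tgt wordBank m (i + 1)]

def all_construct_tab_alt (target : String) (wordBank : List String) : List (List String) :=
  (acMemo target.toList wordBank target.toList.length).getLastD []             -- return ways(len(target))

-- ===== PRECONDITION & SPEC =====
-- Pre_ excludes wordBanks containing the empty string: there Python A loops forever
-- (it keeps appending to the very list table[i] it is iterating over) and never returns.
def Pre_all_construct_tab (target : String) (wordBank : List String) : Prop := ¬ ("" ∈ wordBank)
instance (target : String) (wordBank : List String) : Decidable (Pre_all_construct_tab target wordBank) := by unfold Pre_all_construct_tab; infer_instance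

def pvWitness_all_construct_tab : String × List String := ("purple", ["purp", "p", "ur", "le", "purpl"])

def Spec_all_construct_tab (target : String) (wordBank : List String) (out : List (List String)) : Prop := out = all_construct_tab_alt target wordBank
instance (target : String) (wordBank : List String) (out : List (List String)) : Decidable (Spec_all_construct_tab target wordBank out) := by unfold Spec_all_construct_tab; infer_instance

-- ===== CLAIM (what is proved, stated in full; the proofs are below) =====
def Claim_equal_all_construct_tab : Prop := ∀ (target : String) (wordBank : List String), Dom_all_construct_tab target wordBank → Pre_all_construct_tab target wordBank → Spec_all_construct_tab target wordBank (all_construct_tab target wordBank)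

-- ===== LEMMAS AND PROOFS =====

-- B's value for prefix length j
def acW (tgt : List Char) (wordBank : List String) (j : Nat) : List (List String) :=
  (acMemo tgt wordBank j).getD j []

-- the contributions "a word starting at s ends exactly at j", in wordBank order
def acG (tgt : List Char) (wordBank : List String) (s j : Nat) : List (List String) :=
  wordBank.flatMap (fun w =>
    if s + w.toList.length = j ∧ (tgt.drop s).take w.toList.length = w.toList then
      (acW tgt wordBank s).map (fun arr => arr ++ [w])
    else [])

theorem acMemo_length (tgt : List Char) (wordBank : List String) (i : Nat) :
    (acMemo tgt wordBank i).length = i + 1 := by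
  induction i with
  | zero => rfl
  | succ i ih => simp [acMemo, ih]

theorem acMemo_getD (tgt : List Char) (wordBank : List String) (i s : Nat) (hs : s ≤ i) :
    (acMemo tgt wordBank i).getD s [] = acW tgt wordBank s := by
  induction i with
  | zero => interval_cases s; rfl
  | succ i ih =>
      rcases Nat.lt_or_ge s (i + 1) with h | h
      · rw [acMemo]
        show ((acMemo tgt wordBank i) ++ _).getD s [] = _
        rw [List.getD_append _ _ _ s (by rw [acMemo_length]; omega)]
        exact ih (by omega)
      · have hsi : s = i + 1 := by omega
        subst hsi; rfl

theorem acW_succ (tgt : List Char) (wordBank : List String) (i : Nat) :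
    acW tgt wordBank (i + 1) = acStep tgt wordBank (acMemo tgt wordBank i) (i + 1) := by
  show ((acMemo tgt wordBank i) ++ _).getD (i + 1) [] = _
  rw [List.getD_eq_getElem?_getD, List.getElem?_append_right (by rw [acMemo_length])]
  simp [acMemo_length]

-- B's value characterised as a flatMap over start positions, ascending
theorem acW_char (tgt : List Char) (wordBank : List String) (j : Nat) :
    acW tgt wordBank j =
      (if j = 0 then [[]] else []) ++ (List.range j).flatMap (fun s => acG tgt wordBank s j) := by
  cases j with
  | zero => rfl
  | succ i =>
      rw [acW_succ, acStep]
      rw [PySem.List.foldl_congr_mem (List.range (i + 1)) _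
        (fun res start => res ++ acG tgt wordBank start (i + 1)) [] ?_]
      · rw [PySem.List.foldl_append_eq_flatMap]; simp
      · intro res start hmem
        have hstart : start < i + 1 := List.mem_range.mp hmem
        rw [PySem.List.foldl_congr_mem wordBank _
          (fun res word => res ++ (if start + word.toList.length = i + 1 ∧
              (tgt.drop start).take word.toList.length = word.toList then
              (acW tgt wordBank start).map (fun arr => arr ++ [word]) else [])) res ?_]
        · rw [PySem.List.foldl_append_eq_flatMap]; rfl
        · intro acc w _
          rw [PySem.List.slice_natCast]
          beta_reduce
          rw [acMemo_getD tgt wordBank i start (by omega)]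
          by_cases hc : start + w.toList.length = i + 1 ∧
              (tgt.drop start).take w.toList.length = w.toList
          · obtain ⟨hc1, hc2⟩ := hc
            have hcl : w.toList.length = i + 1 - start ∧
                (tgt.drop start).take (i + 1 - start) = w.toList := by
              refine ⟨by omega, ?_⟩
              rw [show i + 1 - start = w.toList.length by omega]; exact hc2
            rw [if_pos hcl, if_pos ⟨hc1, hc2⟩]
          · rw [if_neg ?_, if_neg hc, List.append_nil]
            rintro ⟨h1, h2⟩
            exact hc ⟨by rw [h1]; omega, by rw [h1]; exact h2⟩

-- ---- A side ----

-- the table of A after the first i outer iterations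
def acApart (tgt : List Char) (wordBank : List String) (i : Nat) : List (List (List String)) :=
  (List.range i).foldl (fun tb k => wordBank.foldl (acInner tgt k) tb)
    ((List.replicate (tgt.length + 1) ([] : List (List String))).set 0 [[]])

theorem acInner_length (tgt : List Char) (i : Nat) (t : List (List (List String))) (w : String) :
    (acInner tgt i t w).length = t.length := by
  unfold acInner; split_ifs <;> simp [List.length_modify]

theorem acFoldInner_length (tgt : List Char) (i : Nat) (ws : List String) :
    ∀ (t : List (List (List String))), (ws.foldl (acInner tgt i) t).length = t.length := by
  induction ws with
  | nil => intro t; rfl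
  | cons w ws ih => intro t; rw [List.foldl_cons, ih, acInner_length]

theorem acInner_getD_ne (tgt : List Char) (i : Nat) (t : List (List (List String))) (w : String)
    (j : Nat) (_hw : w.toList ≠ []) (hj : i + w.toList.length ≠ j) :
    (acInner tgt i t w).getD j [] = t.getD j [] := by
  unfold acInner; split_ifs with h
  · simp only [List.getD_eq_getElem?_getD]
    rw [List.getElem?_modify]
    simp only [if_neg hj]
    cases t[j]? <;> rfl
  · rfl

-- indices ≤ i are untouched by iteration i (every word is nonempty)
theorem acFoldInner_getD_le (tgt : List Char) (i j : Nat) (hj : j ≤ i) (ws : List String) :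
    ∀ (t : List (List (List String))), (∀ w ∈ ws, w.toList ≠ []) →
    (ws.foldl (acInner tgt i) t).getD j [] = t.getD j [] := by
  induction ws with
  | nil => intro t _; rfl
  | cons w ws ih =>
      intro t hb
      have hw := hb w List.mem_cons_self
      rw [List.foldl_cons, ih _ (fun w h => hb w (List.mem_cons_of_mem _ h)),
        acInner_getD_ne tgt i t w j hw (by have : 1 ≤ w.toList.length := List.length_pos_iff.mpr hw; omega)]

-- what iteration i appends to entry j > i
theorem acFoldInner_getD_gt (tgt : List Char) (i j : Nat) (hij : i < j) (ws : List String) :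
    ∀ (t : List (List (List String))), (∀ w ∈ ws, w.toList ≠ []) → j < t.length →
    (ws.foldl (acInner tgt i) t).getD j []
      = t.getD j [] ++ ws.flatMap (fun w =>
          if i + w.toList.length = j ∧ (tgt.drop i).take w.toList.length = w.toList then
            (t.getD i []).map (fun arr => arr ++ [w]) else []) := by
  induction ws with
  | nil => intro t _ _; simp
  | cons w ws ih =>
      intro t hb hjt
      have hw := hb w List.mem_cons_self
      have hwpos : 1 ≤ w.toList.length := List.length_pos_iff.mpr hw
      have hbtail : ∀ w ∈ ws, w.toList ≠ [] := fun w h => hb w (List.mem_cons_of_mem _ h)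
      rw [List.foldl_cons, List.flatMap_cons]
      by_cases hsl : (tgt.drop i).take w.toList.length = w.toList
      · by_cases hend : i + w.toList.length = j
        · -- the modify hits exactly index j
          have hinner : acInner tgt i t w
              = t.modify j (fun l => l ++ (t.getD i []).map (fun arr => arr ++ [w])) := by
            unfold acInner
            rw [if_pos (by rw [PySem.List.slice_natCast_add]; exact hsl), hend]
          rw [hinner, ih _ hbtail (by rw [List.length_modify]; exact hjt)]
          have hgi : (t.modify j (fun l => l ++ (t.getD i []).map (fun arr => arr ++ [w]))).getD i []
              = t.getD i [] := by
            rw [List.getD_eq_getElem?_getD, List.getElem?_modify, List.getD_eq_getElem?_getD]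
            simp only [if_neg (show ¬ j = i by omega)]
            cases t[i]? <;> rfl
          have hgj : (t.modify j (fun l => l ++ (t.getD i []).map (fun arr => arr ++ [w]))).getD j []
              = t.getD j [] ++ (t.getD i []).map (fun arr => arr ++ [w]) := by
            rw [List.getD_eq_getElem?_getD, List.getElem?_modify, List.getElem?_eq_getElem hjt]
            simp [List.getD_eq_getElem?_getD, List.getElem?_eq_getElem hjt]
          rw [hgi, hgj, if_pos ⟨hend, hsl⟩, List.append_assoc]
        · -- the modify hits some other index
          have hti : (acInner tgt i t w).getD i [] = t.getD i [] :=
            acInner_getD_ne tgt i t w i hw (by omega)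
          rw [ih _ hbtail (by rw [acInner_length]; exact hjt),
            acInner_getD_ne tgt i t w j hw hend, hti,
            if_neg (fun hc => hend hc.1), List.nil_append]
      · rw [if_neg (fun hc => hsl hc.2), List.nil_append]
        have hskip : acInner tgt i t w = t := by
          unfold acInner
          rw [if_neg (by rw [PySem.List.slice_natCast_add]; exact hsl)]
        rw [hskip]
        exact ih t hbtail hjt

-- the initial table
theorem acTable0_getD (n j : Nat) :
    ((List.replicate (n + 1) ([] : List (List String))).set 0 [[]]).getD j []
      = (if j = 0 then [[]] else []) := by
  cases j with
  | zero => rfl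
  | succ j =>
      rw [List.replicate_succ]
      simp [List.getD_eq_getElem?_getD, List.getElem?_replicate]
      split_ifs <;> rfl

-- A's loop invariant: after i outer iterations, entry j holds exactly the contributions
-- from start positions below min i j, grouped by start ascending
theorem acApart_inv (tgt : List Char) (wordBank : List String)
    (hb : ∀ w ∈ wordBank, w.toList ≠ []) (i : Nat) :
    (acApart tgt wordBank i).length = tgt.length + 1 ∧
    ∀ j, j ≤ tgt.length →
      (acApart tgt wordBank i).getD j []
        = (if j = 0 then [[]] else []) ++ (List.range (min i j)).flatMap (fun s => acG tgt wordBank s j) := by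
  induction i with
  | zero =>
      constructor
      · simp [acApart]
      · intro j hj
        have h0 : acApart tgt wordBank 0
            = (List.replicate (tgt.length + 1) ([] : List (List String))).set 0 [[]] := rfl
        rw [h0, acTable0_getD]
        simp
  | succ i ih =>
      have hstep : acApart tgt wordBank (i + 1)
          = wordBank.foldl (acInner tgt i) (acApart tgt wordBank i) := by
        rw [acApart, List.range_succ, List.foldl_append]; rfl
      constructor
      · rw [hstep, acFoldInner_length]; exact ih.1
      · intro j hj
        rcases Nat.lt_or_ge i j with hij | hij
        · -- i < j: iteration i appends acG i j
          rw [hstep, acFoldInner_getD_gt tgt i j hij wordBank _ hb (by rw [ih.1]; omega)]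
          rw [ih.2 j hj]
          have hgi : (acApart tgt wordBank i).getD i [] = acW tgt wordBank i := by
            rcases Nat.lt_or_ge i (tgt.length + 1) with hi | hi
            · rw [ih.2 i (by omega), Nat.min_self, ← acW_char]
            · exfalso; omega
          have hpiece : wordBank.flatMap (fun w =>
              if i + w.toList.length = j ∧ (tgt.drop i).take w.toList.length = w.toList then
                ((acApart tgt wordBank i).getD i []).map (fun arr => arr ++ [w]) else [])
              = acG tgt wordBank i j := by
            rw [hgi]; rfl
          rw [hpiece, Nat.min_eq_left (by omega), Nat.min_eq_left (by omega),
            List.range_succ, List.flatMap_append, List.flatMap_cons, List.flatMap_nil,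
            List.append_nil, List.append_assoc]
        · -- j ≤ i: entry j unchanged
          rw [hstep, acFoldInner_getD_le tgt i j hij wordBank _ hb, ih.2 j hj,
            Nat.min_eq_right (by omega), Nat.min_eq_right (by omega)]

theorem getLastD_of_length (l : List (List (List String))) (m : Nat) (h : l.length = m + 1) :
    l.getLastD [] = l.getD m [] := by
  rw [List.getLastD_eq_getLast?, List.getLast?_eq_getElem?, List.getD_eq_getElem?_getD, h]
  simp

-- ===== VERDICT (by name: the statement is the Claim_ definition above) =====
theorem all_construct_tab_spec : Claim_equal_all_construct_tab := by
  intro target wordBank _ hpre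
  unfold Spec_all_construct_tab
  have hb : ∀ w ∈ wordBank, w.toList ≠ [] := by
    intro w hw
    have : w ≠ "" := fun h => hpre (h ▸ hw)
    simp [String.toList_eq_nil_iff, this]
  have hport : all_construct_tab target wordBank
      = (acApart target.toList wordBank (target.toList.length + 1)).getLastD [] := by
    simp only [all_construct_tab, acApart, List.length_set, List.length_replicate]
  have hinv := acApart_inv target.toList wordBank hb (target.toList.length + 1)
  rw [hport, getLastD_of_length _ _ hinv.1,
    hinv.2 target.toList.length le_rfl,
    Nat.min_eq_right (by omega), ← acW_char]
  rw [all_construct_tab_alt, getLastD_of_length _ _ (acMemo_length _ _ _)]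
  rfl
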